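-- pv_equiv track=rewrite | github.com/shulabhb/MediVise | backend/app/llm_service.py | _extract_medications
-- ===== SOURCE A (Python) =====
-- from typing import Dict, List, Optional, Any, Tuple
--
-- def _extract_medications(summary: str) -> List[Dict[str, str]]:
--     """Extract medication information from the summary"""
--     medications = []
--
--     # Simple keyword-based extraction (can be enhanced with NLP)
--     lines = summary.split('\n')
--     current_med = {}
--
--     for line in lines:
--         line = line.strip()
--         if any(keyword in line.lower() for keyword in ['medication', 'medicine', 'drug', 'prescription', 'take', 'mg', 'tablet', 'capsule']):
--             if current_med:
--                 medications.append(current_med)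
--             current_med = {"name": line, "details": ""}
--         elif current_med and line:
--             current_med["details"] += line + " "
--
--     if current_med:
--         medications.append(current_med)
--
--     return medications[:5]  # Limit to top 5 medications
-- ===== SOURCE B (Python) =====
-- def _extract_medications(summary):
--     """Extract medication information from the summary"""
--     keywords = ['medication', 'medicine', 'drug', 'prescription', 'take', 'mg', 'tablet', 'capsule']
--
--     def is_kw(line):
--         low = line.lower()
--         return any(k in low for k in keywords)
--
--     lines = [line.strip() for line in summary.split('\n')]
--     n = len(lines)
--     meds = []
--     i = 0
--     while i < n:
--         if not is_kw(lines[i]):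
--             i += 1
--             continue
--         j = i + 1
--         while j < n and not is_kw(lines[j]):
--             j += 1
--         details = ''.join(line + ' ' for line in lines[i + 1:j] if line)
--         meds.append({'name': lines[i], 'details': details})
--         i = j
--     return meds[:5]
-- ===== Notes on version B (the rewrite author's own statement) =====
-- stated objective: alternative
-- what changed: A's single pass that mutates a current-med dict and flushes it into an accumulator is replaced by a two-pointer scan over the pre-stripped lines: for each keyword line, an inner scan finds the next keyword line and the details string is built in one join over that segment.
import Mathlib
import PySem

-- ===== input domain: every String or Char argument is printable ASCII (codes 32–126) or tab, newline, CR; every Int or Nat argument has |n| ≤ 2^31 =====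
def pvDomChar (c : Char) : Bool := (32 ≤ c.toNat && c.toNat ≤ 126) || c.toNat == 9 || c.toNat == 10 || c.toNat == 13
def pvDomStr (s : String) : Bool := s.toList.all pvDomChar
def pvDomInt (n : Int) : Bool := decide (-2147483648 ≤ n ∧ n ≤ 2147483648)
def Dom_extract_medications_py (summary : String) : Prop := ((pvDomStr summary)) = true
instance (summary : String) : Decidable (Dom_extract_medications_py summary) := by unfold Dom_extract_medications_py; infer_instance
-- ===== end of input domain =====

-- B replaces A's single pass with a mutated current-dict accumulator by a two-pointer
-- segment scan over the pre-stripped lines (same return value; objective: alternative).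

-- ===== PORT A =====
def pvKeywords : List String :=
  ["medication", "medicine", "drug", "prescription", "take", "mg", "tablet", "capsule"]

-- one iteration of A's `for line in lines` loop; state = (medications, current_med)
def pvStepA (st : List (PySem.Dict String String) × PySem.Dict String String) (line0 : String) :
    List (PySem.Dict String String) × PySem.Dict String String :=
  let line := PySem.Str.strip line0
  if pvKeywords.any (fun keyword => PySem.Str.isIn keyword (PySem.Str.lower line)) then
    (if st.2.size ≠ 0 then st.1 ++ [st.2] else st.1,
     PySem.Dict.ofList [("name", line), ("details", "")])
  else if st.2.size ≠ 0 ∧ line ≠ "" then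
    -- current_med["details"] += line + " "  (key "details" is always present when current_med is truthy)
    (st.1, st.2.modify "details" "" (fun s => s ++ line ++ " "))
  else st

def extract_medications_py (summary : String) : List (List (String × String)) :=
  -- split? is always `some` (the separator "\n" is non-empty); the getD default is never used
  let lines := (PySem.Str.split? summary "\n").getD []
  let st := lines.foldl pvStepA ([], PySem.Dict.empty)
  let medications := if st.2.size ≠ 0 then st.1 ++ [st.2] else st.1
  (PySem.List.slice medications none (some 5)).map PySem.Dict.items

-- ===== PORT B =====
def pvIsKw (line : String) : Bool :=
  let low := PySem.Str.lower line
  pvKeywords.any (fun k => PySem.Str.isIn k low)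

-- inner `while j < n and not is_kw(lines[j]): j += 1`
def pvFindNext (lines : List String) (j : Nat) : Nat :=
  if h : j < lines.length then
    if pvIsKw lines[j] then j else pvFindNext lines (j + 1)
  else j
termination_by lines.length - j

theorem pvFindNext_ge (lines : List String) (j : Nat) : j ≤ pvFindNext lines j := by
  unfold pvFindNext
  split
  · split
    · exact le_refl j
    · exact le_trans (Nat.le_succ j) (pvFindNext_ge lines (j + 1))
  · exact le_refl j
termination_by lines.length - j

-- outer `while i < n` loop
def pvScan (lines : List String) (i : Nat) : List (List (String × String)) :=
  if h : i < lines.length then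
    if pvIsKw lines[i] then
      let j := pvFindNext lines (i + 1)
      let details := (PySem.List.slice lines (some ((i : Int) + 1)) (some (j : Int))).foldl
        (fun acc line => if line ≠ "" then acc ++ line ++ " " else acc) ""
      [("name", lines[i]), ("details", details)] :: pvScan lines j
    else pvScan lines (i + 1)
  else []
termination_by lines.length - i
decreasing_by
  · have := pvFindNext_ge lines (i + 1); omega
  · omega

def extract_medications_py_alt (summary : String) : List (List (String × String)) :=
  let lines := ((PySem.Str.split? summary "\n").getD []).map PySem.Str.strip
  PySem.List.slice (pvScan lines 0) none (some 5)

-- ===== PRECONDITION & SPEC =====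
def Spec_extract_medications_py (summary : String) (out : List (List (String × String))) : Prop := out = extract_medications_py_alt summary
instance (summary : String) (out : List (List (String × String))) : Decidable (Spec_extract_medications_py summary out) := by unfold Spec_extract_medications_py; infer_instance

-- ===== CLAIM (what is proved, stated in full; the proofs are below) =====
def Claim_equal_extract_medications_py : Prop := ∀ (summary : String), Dom_extract_medications_py summary → Spec_extract_medications_py summary (extract_medications_py summary)

-- ===== LEMMAS AND PROOFS =====

-- join of the non-empty lines, each with a trailing space
def pvJoinD (ls : List String) : String :=
  ls.foldl (fun acc line => if line ≠ "" then acc ++ line ++ " " else acc) ""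

-- reference segmentation of the (already stripped) lines
def pvSegs (ls : List String) : List (List (String × String)) :=
  match ls with
  | [] => []
  | x :: t =>
    if pvIsKw x then
      [("name", x), ("details", pvJoinD (t.takeWhile (fun y => !pvIsKw y)))] ::
        pvSegs (t.dropWhile (fun y => !pvIsKw y))
    else pvSegs t
termination_by ls.length
decreasing_by
  · have := List.length_dropWhile_le (fun y => !pvIsKw y) t; simp; omega
  · simp

-- step of A's loop over an ALREADY stripped line
def pvStepS (st : List (PySem.Dict String String) × PySem.Dict String String) (line : String) :
    List (PySem.Dict String String) × PySem.Dict String String :=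
  if pvIsKw line then
    (if st.2.size ≠ 0 then st.1 ++ [st.2] else st.1,
     PySem.Dict.ofList [("name", line), ("details", "")])
  else if st.2.size ≠ 0 ∧ line ≠ "" then
    (st.1, st.2.modify "details" "" (fun s => s ++ line ++ " "))
  else st

theorem pvStepS_shift (st : List (PySem.Dict String String) × PySem.Dict String String) (x : String) :
    pvStepS st x = (st.1 ++ (pvStepS ([], st.2) x).1, (pvStepS ([], st.2) x).2) := by
  cases st with
  | mk m c =>
    simp only [pvStepS]
    split_ifs <;> simp

theorem pvFoldl_shift (ls : List String) (m : List (PySem.Dict String String))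
    (c : PySem.Dict String String) :
    ls.foldl pvStepS (m, c) =
      (m ++ (ls.foldl pvStepS ([], c)).1, (ls.foldl pvStepS ([], c)).2) := by
  induction ls generalizing m c with
  | nil => simp
  | cons x t ih =>
    simp only [List.foldl_cons]
    rw [pvStepS_shift (m, c) x, ih, pvStepS_shift ([], c) x]
    simp [ih ((pvStepS ([], c) x).1) ((pvStepS ([], c) x).2)]

-- A's loop from a given current_med, then the final flush
def pvRun (ls : List String) (c : PySem.Dict String String) : List (PySem.Dict String String) :=
  let st := ls.foldl pvStepS ([], c)
  if st.2.size ≠ 0 then st.1 ++ [st.2] else st.1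

theorem pvRun_cons (x : String) (t : List String) (c : PySem.Dict String String) :
    pvRun (x :: t) c = (pvStepS ([], c) x).1 ++ pvRun t (pvStepS ([], c) x).2 := by
  simp only [pvRun, List.foldl_cons]
  rw [pvFoldl_shift t (pvStepS ([], c) x).1 (pvStepS ([], c) x).2]
  split_ifs <;> simp

def pvMkD (n d : String) : PySem.Dict String String := PySem.Dict.mk [("name", n), ("details", d)]

theorem pvOfList_eq (l : String) :
    PySem.Dict.ofList [("name", l), ("details", "")] = pvMkD l "" := by
  simp [PySem.Dict.ofList, PySem.Dict.update, PySem.Dict.insert, PySem.Dict.contains,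
    PySem.Dict.empty, pvMkD]

theorem pvModify_eq (n d : String) (f : String → String) :
    (pvMkD n d).modify "details" "" f = pvMkD n (f d) := by
  simp [PySem.Dict.modify, PySem.Dict.insert, PySem.Dict.getD, PySem.Dict.get?,
    PySem.Dict.contains, pvMkD]

theorem pvSize_mkD (n d : String) : (pvMkD n d).size = 2 := rfl

theorem pvStepS_kw {x : String} (hk : pvIsKw x = true) (c : PySem.Dict String String) :
    pvStepS ([], c) x = (if c.size ≠ 0 then [c] else [], pvMkD x "") := by
  simp only [pvStepS, hk, if_true, pvOfList_eq]
  split_ifs <;> simp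

theorem pvStepS_upd {x : String} (hk : ¬ pvIsKw x = true) (hx : x ≠ "") (n d : String) :
    pvStepS ([], pvMkD n d) x = ([], pvMkD n (d ++ x ++ " ")) := by
  simp [pvStepS, hk, hx, pvSize_mkD, pvModify_eq]

theorem pvStepS_emptyline (c : PySem.Dict String String) (hk : ¬ pvIsKw "" = true) :
    pvStepS ([], c) "" = ([], c) := by
  simp [pvStepS, hk]

theorem pvStepS_emptycur {x : String} (hk : ¬ pvIsKw x = true) :
    pvStepS ([], PySem.Dict.empty) x = ([], PySem.Dict.empty) := by
  simp [pvStepS, hk, PySem.Dict.size, PySem.Dict.empty]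

theorem pvJoinD_cons (x : String) (t : List String) :
    pvJoinD (x :: t) = (if x ≠ "" then x ++ " " else "") ++ pvJoinD t := by
  have init : ∀ (l : List String) (a : String),
      l.foldl (fun acc line => if line ≠ "" then acc ++ line ++ " " else acc) a
        = a ++ l.foldl (fun acc line => if line ≠ "" then acc ++ line ++ " " else acc) "" := by
    intro l
    induction l with
    | nil => simp
    | cons y u ih =>
      intro a
      simp only [List.foldl_cons]
      rw [ih (if y ≠ "" then a ++ y ++ " " else a), ih (if y ≠ "" then "" ++ y ++ " " else "")]
      split_ifs <;> simp [String.append_assoc]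
  simp only [pvJoinD, List.foldl_cons]
  rw [init t (if x ≠ "" then "" ++ x ++ " " else ""), init t]
  split_ifs <;> simp

theorem pvSegs_nil : pvSegs [] = [] := by rw [pvSegs]

theorem pvSegs_cons (x : String) (t : List String) : pvSegs (x :: t) =
    (if pvIsKw x then
      [("name", x), ("details", pvJoinD (t.takeWhile (fun y => !pvIsKw y)))] ::
        pvSegs (t.dropWhile (fun y => !pvIsKw y))
    else pvSegs t) := by rw [pvSegs]

-- the heart of the A-side proof: the flushed fold is the segmentation
theorem pvRun_segs (ls : List String) :
    ((pvRun ls PySem.Dict.empty).map PySem.Dict.items = pvSegs ls) ∧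
    (∀ n d : String, (pvRun ls (pvMkD n d)).map PySem.Dict.items =
      [("name", n), ("details", d ++ pvJoinD (ls.takeWhile (fun y => !pvIsKw y)))] ::
        pvSegs (ls.dropWhile (fun y => !pvIsKw y))) := by
  induction ls with
  | nil =>
    constructor
    · rw [pvSegs_nil]
      simp [pvRun, PySem.Dict.size, PySem.Dict.empty]
    · intro n d
      simp only [List.takeWhile_nil, List.dropWhile_nil]
      rw [pvSegs_nil]
      simp only [pvRun, List.foldl_nil, pvSize_mkD]
      norm_num
      simp [pvMkD, pvJoinD, String.append_empty, PySem.Dict.items]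
  | cons x t ih =>
    by_cases hk : pvIsKw x = true
    · constructor
      · rw [pvRun_cons, pvStepS_kw hk]
        rw [if_neg (by simp [PySem.Dict.size, PySem.Dict.empty])]
        rw [List.nil_append, ih.2 x ""]
        conv_rhs => rw [pvSegs_cons]
        simp [hk]
      · intro n d
        rw [pvRun_cons, pvStepS_kw hk]
        rw [if_pos (by rw [pvSize_mkD]; omega)]
        simp only [List.map_cons, List.singleton_append]
        rw [ih.2 x ""]
        simp only [List.takeWhile_cons, List.dropWhile_cons, hk, Bool.not_true,
          Bool.false_eq_true, if_false]
        rw [pvSegs_cons]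
        simp [hk, pvMkD, PySem.Dict.items, pvJoinD]
    · constructor
      · rw [pvRun_cons, pvStepS_emptycur hk, List.nil_append, ih.1]
        conv_rhs => rw [pvSegs_cons]
        simp [hk]
      · intro n d
        by_cases hx : x = ""
        · subst hx
          rw [pvRun_cons, pvStepS_emptyline _ hk, List.nil_append, ih.2 n d]
          simp [hk, pvJoinD_cons]
        · rw [pvRun_cons, pvStepS_upd hk hx n d, List.nil_append, ih.2 n (d ++ x ++ " ")]
          simp only [List.takeWhile_cons, List.dropWhile_cons, Bool.not_eq_eq_eq_not,
            Bool.not_true, hk]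
          simp [hk, pvJoinD_cons, hx, String.append_assoc]

-- B side: the two-pointer scan also computes the segmentation
theorem pvTake_takeWhile {α : Type} (p : α → Bool) (l : List α) :
    l.take (l.takeWhile p).length = l.takeWhile p := by
  have h := List.takeWhile_prefix (l := l) p
  rw [List.prefix_iff_eq_take] at h
  exact h.symm

theorem pvDrop_takeWhile {α : Type} (p : α → Bool) (l : List α) :
    l.drop (l.takeWhile p).length = l.dropWhile p := by
  induction l with
  | nil => simp
  | cons x t ih =>
    by_cases hp : p x = true
    · simp [List.takeWhile_cons, hp, ih]
    · simp [List.takeWhile_cons, hp]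

theorem pvFindNext_eq (lines : List String) (j : Nat) :
    pvFindNext lines j = j + ((lines.drop j).takeWhile (fun y => !pvIsKw y)).length := by
  unfold pvFindNext
  split
  · rename_i h
    rw [List.drop_eq_getElem_cons h]
    by_cases hk : pvIsKw lines[j] = true
    · simp [hk]
    · rw [if_neg hk, pvFindNext_eq lines (j + 1)]
      simp only [List.takeWhile_cons]
      rw [if_pos (by simp [hk])]
      simp only [List.length_cons]
      omega
  · rename_i h
    rw [List.drop_eq_nil_of_le (by omega)]
    simp
termination_by lines.length - j

theorem pvScan_eq (lines : List String) (i : Nat) :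
    pvScan lines i = pvSegs (lines.drop i) := by
  unfold pvScan
  split
  · rename_i h
    rw [List.drop_eq_getElem_cons h, pvSegs_cons]
    by_cases hk : pvIsKw lines[i] = true
    · rw [if_pos hk, if_pos hk]
      have hscan : pvScan lines (pvFindNext lines (i + 1)) =
          pvSegs ((lines.drop (i + 1)).dropWhile (fun y => !pvIsKw y)) := by
        rw [pvScan_eq lines (pvFindNext lines (i + 1)), pvFindNext_eq lines (i + 1),
          ← List.drop_drop, pvDrop_takeWhile]
      have hslice : PySem.List.slice lines (some ((i : Int) + 1))
            (some ((pvFindNext lines (i + 1) : Nat) : Int)) =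
          (lines.drop (i + 1)).takeWhile (fun y => !pvIsKw y) := by
        have hc : ((i : Int) + 1) = ((i + 1 : Nat) : Int) := by push_cast; ring
        rw [hc, PySem.List.slice_natCast, pvFindNext_eq lines (i + 1)]
        have h2 : (i + 1 + ((lines.drop (i + 1)).takeWhile (fun y => !pvIsKw y)).length)
            - (i + 1) = ((lines.drop (i + 1)).takeWhile (fun y => !pvIsKw y)).length := by
          omega
        rw [h2, pvTake_takeWhile]
      simp only [hscan, hslice]
      rfl
    · rw [if_neg hk, if_neg hk, pvScan_eq lines (i + 1)]
  · rename_i h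
    rw [List.drop_eq_nil_of_le (by omega), pvSegs_nil]
termination_by lines.length - i
decreasing_by
  · have := pvFindNext_ge lines (i + 1); omega
  · omega

-- ===== VERDICT (by name: the statement is the Claim_ definition above) =====
theorem extract_medications_py_spec : Claim_equal_extract_medications_py := by
  intro summary _
  show extract_medications_py summary = extract_medications_py_alt summary
  have hfold :
      List.foldl pvStepA ([], (PySem.Dict.empty : PySem.Dict String String))
          ((PySem.Str.split? summary "\n").getD []) =
        List.foldl pvStepS ([], PySem.Dict.empty)
          (((PySem.Str.split? summary "\n").getD []).map PySem.Str.strip) := by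
    rw [List.foldl_map]
    rfl
  simp only [extract_medications_py, extract_medications_py_alt]
  rw [hfold, PySem.List.slice_to _ (by norm_num), PySem.List.slice_to _ (by norm_num),
    List.map_take, pvScan_eq _ 0, List.drop_zero]
  congr 1
  exact (pvRun_segs (((PySem.Str.split? summary "\n").getD []).map PySem.Str.strip)).1
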